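-- pv_equiv track=rewrite | github.com/zAiro12/AdventOfCode | 2025/day02/b.py | find_all_equal_partitions
-- ===== SOURCE A (Python) =====
-- from typing import List
--
-- def split_into_equal_parts(s: str, parts: int) -> List[str]:
--     """Split `s` into `parts` substrings of equal length.
--
--     Raises ValueError if `s` cannot be evenly divided into `parts` parts.
--     """
--     if parts < 1:
--         raise ValueError("parts must be >= 1")
--     if len(s) % parts != 0:
--         raise ValueError("String length is not divisible by number of parts")
--     size = len(s) // parts
--     return [s[i * size:(i + 1) * size] for i in range(parts)]
--
-- def all_equal_substrings(s: str, parts: int) -> bool: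
--     """Return True if splitting `s` into `parts` equal parts yields all identical substrings."""
--     try:
--         parts_list = split_into_equal_parts(s, parts)
--     except ValueError:
--         return False
--     first = parts_list[0]
--     return all(p == first for p in parts_list)
--
-- def find_all_equal_partitions(s: str) -> List[int]:
--     """Return a list of `parts` values (>1) such that `s` can be split into that many equal identical parts.
--
--     Example: '1212' -> [2] (since '12' == '12') ; '1111' -> [2,4] ('11'=='11', and '1'=='1'=='1'=='1')
--     """
--     res: List[int] = []
--     n = len(s)
--     for parts in range(2, n + 1):
--         if n % parts != 0:
--             continue
--         if all_equal_substrings(s, parts):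
--             res.append(parts)
--     return res
-- ===== SOURCE B (Python) =====
-- def find_all_equal_partitions(s):
--     n = len(s)
--     res = []
--     for d in range(n // 2, 0, -1):
--         if n % d == 0 and s[d:] == s[:n - d]:
--             res.append(n // d)
--     return res
-- ===== Notes on version B (the rewrite author's own statement) =====
-- stated objective: faster
-- what changed: Instead of splitting s into k substrings for each candidate part-count and comparing them all to the first, B iterates over candidate block lengths d in descending order and tests d-periodicity with a single shift comparison s[d:] == s[:n-d], appending n//d.
import Mathlib
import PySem

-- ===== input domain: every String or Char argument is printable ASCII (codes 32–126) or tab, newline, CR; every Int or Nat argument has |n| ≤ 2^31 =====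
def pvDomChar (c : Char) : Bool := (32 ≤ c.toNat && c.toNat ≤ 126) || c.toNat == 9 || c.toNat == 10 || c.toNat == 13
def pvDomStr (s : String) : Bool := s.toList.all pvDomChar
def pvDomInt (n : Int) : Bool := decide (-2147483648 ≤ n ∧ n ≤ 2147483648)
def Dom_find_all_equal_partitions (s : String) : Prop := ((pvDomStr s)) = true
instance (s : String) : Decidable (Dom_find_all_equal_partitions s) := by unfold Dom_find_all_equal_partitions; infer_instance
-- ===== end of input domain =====

-- B replaces A's per-candidate splitting of s into k substrings by a descending scan over
-- block lengths d with a single shift comparison s[d:] == s[:n-d] per divisor (objective: faster).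


-- ===== PORT A =====
def split_into_equal_parts (s : String) (parts : Int) : Option (List String) :=
  if parts < 1 then none                                        -- raise ValueError
  else if PySem.Int.mod (PySem.Str.len s) parts ≠ 0 then none   -- raise ValueError
  else
    let size := PySem.Int.floordiv (PySem.Str.len s) parts
    some ((PySem.List.pyRange 0 parts 1).map
      (fun i => PySem.Str.slice s (some (i * size)) (some ((i + 1) * size))))

def all_equal_substrings (s : String) (parts : Int) : Bool :=
  match split_into_equal_parts s parts with
  | none => false                                    -- except ValueError: return False
  | some parts_list =>
    match PySem.List.pyGet? parts_list 0 with
    | none => false                                  -- unreachable: parts ≥ 1 makes the list nonempty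
    | some first => parts_list.all (fun p => p == first)

def find_all_equal_partitions (s : String) : List Int :=
  (PySem.List.pyRange 2 (PySem.Str.len s + 1) 1).foldl
    (fun res parts =>
      if PySem.Int.mod (PySem.Str.len s) parts ≠ 0 then res
      else if all_equal_substrings s parts then res ++ [parts]
      else res)
    []

-- ===== PORT B =====
def find_all_equal_partitions_alt (s : String) : List Int :=
  let n := PySem.Str.len s
  (PySem.List.pyRange (PySem.Int.floordiv n 2) 0 (-1)).foldl
    (fun res d =>
      if (PySem.Int.mod n d == 0) &&
         (PySem.Str.slice s (some d) none == PySem.Str.slice s none (some (n - d))) then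
        res ++ [PySem.Int.floordiv n d]
      else res)
    []

-- ===== PRECONDITION & SPEC =====
def Spec_find_all_equal_partitions (s : String) (out : List Int) : Prop := out = find_all_equal_partitions_alt s
instance (s : String) (out : List Int) : Decidable (Spec_find_all_equal_partitions s out) := by unfold Spec_find_all_equal_partitions; infer_instance

-- ===== CLAIM (what is proved, stated in full; the proofs are below) =====
def Claim_equal_find_all_equal_partitions : Prop := ∀ (s : String), Dom_find_all_equal_partitions s → Spec_find_all_equal_partitions s (find_all_equal_partitions s)

-- ===== LEMMAS AND PROOFS =====

theorem pv_block_le {d k i : Nat} (hik : i < k) : i * d + d ≤ k * d := by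
  have h1 : (i + 1) * d ≤ k * d := Nat.mul_le_mul_right d hik
  have h2 : (i + 1) * d = i * d + d := by ring
  omega

theorem pv_idx_lt {α : Type} {l : List α} {d k i r : Nat} (hn : l.length = k * d)
    (hik : i < k) (hr : r < d) : i * d + r < l.length := by
  have := pv_block_le (d := d) hik
  omega

theorem pv_drop_eq_take_iff {α : Type} (l : List α) (d : Nat) (hd : d ≤ l.length) :
    l.drop d = l.take (l.length - d) ↔ ∀ j, (h : d + j < l.length) → l[d + j] = l[j] := by
  constructor
  · intro h j hj
    have hj' : j < (l.drop d).length := by simp; omega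
    have e := List.getElem_of_eq h hj'
    simpa [List.getElem_drop, List.getElem_take] using e
  · intro h
    apply List.ext_getElem (by simp)
    intro i h1 h2
    rw [List.getElem_drop, List.getElem_take]
    exact h i (by simp at h1; omega)

theorem pv_block_eq_iff {α : Type} (l : List α) (d i : Nat) (h : i * d + d ≤ l.length) :
    (l.drop (i * d)).take d = l.take d ↔ ∀ j, (hj : j < d) → l[i * d + j]'(by omega) = l[j]'(by omega) := by
  constructor
  · intro heq j hj
    have hj' : j < ((l.drop (i * d)).take d).length := by simp; omega
    have e := List.getElem_of_eq heq hj'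
    simpa [List.getElem_take, List.getElem_drop] using e
  · intro hall
    apply List.ext_getElem (by simp; omega)
    intro j h1 h2
    rw [List.getElem_take, List.getElem_drop, List.getElem_take]
    exact hall j (by simp at h1; omega)

theorem pv_blocks_iff_period {α : Type} (l : List α) (d k : Nat) (hd : 0 < d) (hk : 1 ≤ k)
    (hn : l.length = k * d) :
    (∀ i, i < k → (l.drop (i * d)).take d = l.take d) ↔
      l.drop d = l.take (l.length - d) := by
  have hdl : d ≤ l.length := by
    rw [hn]; exact Nat.le_mul_of_pos_left d hk
  rw [pv_drop_eq_take_iff l d hdl]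
  constructor
  · intro hb j hj
    obtain ⟨i, r, hrd, hjd⟩ : ∃ i r, r < d ∧ j = i * d + r :=
      ⟨j / d, j % d, Nat.mod_lt _ hd, by rw [Nat.mul_comm]; exact (Nat.div_add_mod j d).symm⟩
    have hik : i + 1 < k := by
      by_contra hc
      have h1 : k * d ≤ (i + 1) * d := Nat.mul_le_mul_right d (by omega)
      have h2 : (i + 1) * d = i * d + d := by ring
      omega
    have e1 := (pv_block_eq_iff l d i
        (le_trans (pv_block_le (by omega : i < k)) (le_of_eq hn.symm))).1 (hb i (by omega)) r hrd
    have e2 := (pv_block_eq_iff l d (i + 1)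
        (le_trans (pv_block_le hik) (le_of_eq hn.symm))).1 (hb (i + 1) hik) r hrd
    subst hjd
    have hreq : (i + 1) * d = i * d + d := by ring
    calc l[d + (i * d + r)] = l[(i + 1) * d + r]'(pv_idx_lt hn hik hrd) := by congr 1; omega
      _ = l[r]'(by omega) := e2
      _ = l[i * d + r]'(pv_idx_lt hn (by omega) hrd) := e1.symm
  · intro hp
    have key : ∀ i, (hik : i < k) → ∀ r, (hr : r < d) →
        l[i * d + r]'(pv_idx_lt hn hik hr) = l[r]'(by omega) := by
      intro i
      induction i with
      | zero => intro _ r hr; congr 1; omega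
      | succ m ih =>
        intro hm r hr
        have hmk : m < k := by omega
        have hreq : (m + 1) * d = m * d + d := by ring
        have h1 : d + (m * d + r) < l.length := by
          have := pv_idx_lt (i := m + 1) hn hm hr; omega
        have e := hp (m * d + r) h1
        calc l[(m + 1) * d + r]'(pv_idx_lt hn hm hr) = l[d + (m * d + r)]'h1 := by congr 1; omega
          _ = l[m * d + r]'(by omega) := e
          _ = l[r]'(by omega) := ih hmk r hr
    intro i hik
    rw [pv_block_eq_iff l d i (le_trans (pv_block_le hik) (le_of_eq hn.symm))]
    intro j hj
    exact key i hik j hj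

theorem pv_shift_iff (s : String) (D : Nat) (hDn : D ≤ s.toList.length) :
    (PySem.Str.slice s (some (D : Int)) none ==
       PySem.Str.slice s none (some ((s.toList.length : Int) - (D : Int)))) = true ↔
      s.toList.drop D = s.toList.take (s.toList.length - D) := by
  have e1 : (PySem.Str.slice s (some (D : Int)) none).toList = s.toList.drop D := by
    rw [PySem.Str.toList_slice]
    simp only [PySem.Chars.slice_eq_listSlice]
    exact PySem.List.slice_from_natCast s.toList D
  have e2 : (PySem.Str.slice s none (some ((s.toList.length : Int) - (D : Int)))).toList
      = s.toList.take (s.toList.length - D) := by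
    rw [PySem.Str.toList_slice]
    simp only [PySem.Chars.slice_eq_listSlice]
    rw [show ((s.toList.length : Int) - (D : Int)) = ((s.toList.length - D : Nat) : Int) by omega]
    exact PySem.List.slice_to_natCast s.toList _
  rw [beq_iff_eq]
  constructor
  · intro h; rw [← e1, ← e2, h]
  · intro h; apply String.ext; rw [e1, e2]; exact h

theorem pv_split_eq (s : String) (K : Nat) (h1 : 1 ≤ K) (hdvd : K ∣ s.toList.length) :
    split_into_equal_parts s (K : Int) = some ((PySem.List.pyRange 0 (K : Int) 1).map
      (fun i => PySem.Str.slice s (some (i * ((s.toList.length / K : Nat) : Int)))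
                                  (some ((i + 1) * ((s.toList.length / K : Nat) : Int))))) := by
  have hmodN : s.toList.length % K = 0 := Nat.mod_eq_zero_of_dvd hdvd
  unfold split_into_equal_parts
  rw [PySem.Str.len_eq, PySem.Int.mod_natCast, PySem.Int.floordiv_natCast, hmodN]
  rw [if_neg (show ¬((K : Int) < 1) by omega), if_neg (by simp)]

theorem pv_first_eq (g : Int → String) (K : Nat) (h1 : 1 ≤ K) :
    PySem.List.pyGet? ((PySem.List.pyRange 0 (K : Int) 1).map g) 0 = some (g 0) := by
  rw [PySem.List.pyRange_one_cons (by omega : (0:Int) < (K : Int))]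
  unfold PySem.List.pyGet? PySem.List.pyIdx?
  simp

theorem pv_aeq_red (s : String) (parts : Int) (pl : List String) (f : String)
    (h : split_into_equal_parts s parts = some pl)
    (hf : PySem.List.pyGet? pl 0 = some f) :
    all_equal_substrings s parts = pl.all (fun p => p == f) := by
  unfold all_equal_substrings
  rw [h]
  simp only [hf]

theorem pv_allEq_iff (s : String) (K : Nat) (h2 : 2 ≤ K) (hKn : K ≤ s.toList.length)
    (hdvd : K ∣ s.toList.length) :
    all_equal_substrings s (K : Int) = true ↔
      s.toList.drop (s.toList.length / K) =
        s.toList.take (s.toList.length - s.toList.length / K) := by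
  have hN2 : 2 ≤ s.toList.length := le_trans h2 hKn
  have hD : 0 < s.toList.length / K := Nat.div_pos hKn (by omega)
  have hn : s.toList.length = K * (s.toList.length / K) := (Nat.mul_div_cancel' hdvd).symm
  have hg : ∀ I : Nat,
      (PySem.Str.slice s (some ((I : Int) * ((s.toList.length / K : Nat) : Int)))
        (some (((I : Int) + 1) * ((s.toList.length / K : Nat) : Int)))).toList
      = (s.toList.drop (I * (s.toList.length / K))).take (s.toList.length / K) := by
    intro I
    rw [PySem.Str.toList_slice]
    simp only [PySem.Chars.slice_eq_listSlice]
    rw [show ((I : Int) * ((s.toList.length / K : Nat) : Int))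
          = ((I * (s.toList.length / K) : Nat) : Int) by push_cast; ring,
        show (((I : Int) + 1) * ((s.toList.length / K : Nat) : Int))
          = ((I * (s.toList.length / K) : Nat) : Int) + ((s.toList.length / K : Nat) : Int) by
            push_cast; ring]
    exact PySem.List.slice_natCast_add s.toList _ _
  have h0q := hg 0
  rw [Nat.cast_zero, Nat.zero_mul, List.drop_zero] at h0q
  rw [pv_aeq_red s (K : Int) _ _ (pv_split_eq s K (by omega) hdvd) (pv_first_eq _ K (by omega))]
  rw [← pv_blocks_iff_period s.toList (s.toList.length / K) K hD (by omega) hn]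
  simp only [List.all_eq_true, List.mem_map, forall_exists_index, and_imp,
    beq_iff_eq, PySem.List.mem_pyRange_one]
  constructor
  · intro hall I hIK
    have hs := hall _ (I : Int) (by omega) (by exact_mod_cast hIK) rfl
    have hT := congrArg String.toList hs
    rw [hg I, h0q] at hT
    exact hT
  · intro hblocks x d hd0 hdK heq
    subst heq
    apply String.ext
    have hIeq : d = ((d.toNat : Nat) : Int) := by omega
    rw [hIeq, hg d.toNat, h0q]
    exact hblocks d.toNat (by omega)

theorem pv_div_lt_div {N A B : Nat} (hB : 0 < B) (hBA : B < A) (hA : A ∣ N) (hBd : B ∣ N)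
    (hAN : A ≤ N) : N / A < N / B := by
  have hApos : 0 < A := lt_trans hB hBA
  have h1 : N / A * A = N := Nat.div_mul_cancel hA
  have h2 : N / B * B = N := Nat.div_mul_cancel hBd
  have hq : 0 < N / A := Nat.div_pos hAN hApos
  have h3 : N / A * B < N / B * B := by nlinarith
  exact Nat.lt_of_mul_lt_mul_right h3

theorem pv_A_eq (s : String) :
    find_all_equal_partitions s =
      (PySem.List.pyRange 2 ((s.toList.length : Int) + 1) 1).filter
        (fun parts => decide (PySem.Int.mod ((s.toList.length : Int)) parts = 0) &&
          all_equal_substrings s parts) := by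
  unfold find_all_equal_partitions
  simp only [PySem.Str.len_eq]
  have hcongr : ∀ (res : List Int) (parts : Int),
      parts ∈ PySem.List.pyRange 2 ((s.toList.length : Int) + 1) 1 →
      (if PySem.Int.mod ((s.toList.length : Int)) parts ≠ 0 then res
       else if all_equal_substrings s parts then res ++ [parts] else res) =
      (if (decide (PySem.Int.mod ((s.toList.length : Int)) parts = 0) &&
            all_equal_substrings s parts) = true then res ++ [parts] else res) := by
    intro res parts _
    by_cases hm : PySem.Int.mod ((s.toList.length : Int)) parts = 0
    · rw [if_neg (not_not_intro hm)]
      by_cases ha : all_equal_substrings s parts = true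
      · rw [if_pos ha, if_pos (by rw [Bool.and_eq_true, decide_eq_true_eq]; exact ⟨hm, ha⟩)]
      · rw [if_neg ha, if_neg (by rw [Bool.and_eq_true]; rintro ⟨-, h2⟩; exact ha h2)]
    · rw [if_pos hm, if_neg (by rw [Bool.and_eq_true, decide_eq_true_eq]; rintro ⟨h1, -⟩; exact hm h1)]
  refine (PySem.List.foldl_congr_mem _ _ _ _ hcongr).trans ?_
  rw [PySem.List.foldl_append_if _ (fun x => x)]
  simp

theorem pv_B_eq (s : String) :
    find_all_equal_partitions_alt s =
      ((PySem.List.pyRange ((s.toList.length / 2 : Nat) : Int) 0 (-1)).filter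
        (fun d => (PySem.Int.mod ((s.toList.length : Int)) d == 0) &&
          (PySem.Str.slice s (some d) none ==
            PySem.Str.slice s none (some ((s.toList.length : Int) - d))))).map
        (fun d => PySem.Int.floordiv ((s.toList.length : Int)) d) := by
  unfold find_all_equal_partitions_alt
  simp only [PySem.Str.len_eq]
  rw [show PySem.Int.floordiv ((s.toList.length : Int)) 2 = ((s.toList.length / 2 : Nat) : Int) from
    by exact_mod_cast PySem.Int.floordiv_natCast s.toList.length 2]
  rw [PySem.List.foldl_append_if _ (fun d => PySem.Int.floordiv ((s.toList.length : Int)) d)]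
  simp

theorem pv_mem_iff (s : String) (k : Int) :
    (k ∈ (PySem.List.pyRange 2 ((s.toList.length : Int) + 1) 1).filter
        (fun parts => decide (PySem.Int.mod ((s.toList.length : Int)) parts = 0) &&
          all_equal_substrings s parts)) ↔
    (k ∈ ((PySem.List.pyRange ((s.toList.length / 2 : Nat) : Int) 0 (-1)).filter
        (fun d => (PySem.Int.mod ((s.toList.length : Int)) d == 0) &&
          (PySem.Str.slice s (some d) none ==
            PySem.Str.slice s none (some ((s.toList.length : Int) - d))))).map
        (fun d => PySem.Int.floordiv ((s.toList.length : Int)) d)) := by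
  simp only [List.mem_filter, List.mem_map, PySem.List.mem_pyRange_one,
    PySem.List.mem_pyRange_neg_one, Bool.and_eq_true, decide_eq_true_eq, beq_iff_eq]
  constructor
  · rintro ⟨⟨h2k, hkN⟩, hmod, hall⟩
    lift k to Nat using (by omega : (0:Int) ≤ k) with K
    have hdvd : K ∣ s.toList.length := by
      rw [PySem.Int.mod_eq_zero_iff_dvd] at hmod; exact_mod_cast hmod
    have hKn : K ≤ s.toList.length := by exact_mod_cast (by omega : (K:Int) ≤ (s.toList.length : Int))
    have h2K : 2 ≤ K := by exact_mod_cast h2k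
    have hNpos : 0 < s.toList.length := by omega
    have hperiod := (pv_allEq_iff s K h2K hKn hdvd).1 hall
    have hDpos : 0 < s.toList.length / K := Nat.div_pos hKn (by omega)
    have hDdvd : s.toList.length / K ∣ s.toList.length := Nat.div_dvd_of_dvd hdvd
    refine ⟨((s.toList.length / K : Nat) : Int), ⟨⟨by exact_mod_cast hDpos, ?_⟩, ?_, ?_⟩, ?_⟩
    · exact_mod_cast Nat.div_le_div_left h2K (by omega)
    · rw [PySem.Int.mod_eq_zero_iff_dvd]; exact_mod_cast hDdvd
    · have hs := (pv_shift_iff s (s.toList.length / K) (Nat.div_le_self _ _)).2 hperiod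
      rw [beq_iff_eq] at hs; exact hs
    · rw [show ((s.toList.length : Int)) = ((s.toList.length : Nat) : Int) from rfl,
        PySem.Int.floordiv_natCast, Nat.div_div_self hdvd (by omega)]
  · rintro ⟨d, ⟨⟨h0d, hdN2⟩, hmodd, hshift⟩, rfl⟩
    lift d to Nat using (by omega : (0:Int) ≤ d) with D
    have hDpos : 0 < D := by exact_mod_cast h0d
    have hDle : D ≤ s.toList.length / 2 := by exact_mod_cast hdN2
    have hN2 : 2 ≤ s.toList.length := by
      have := (Nat.le_div_iff_mul_le (by norm_num : 0 < 2)).1 (le_trans hDpos hDle)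
      omega
    have hDdvd : D ∣ s.toList.length := by
      rw [PySem.Int.mod_eq_zero_iff_dvd] at hmodd; exact_mod_cast hmodd
    have hDN : D ≤ s.toList.length := le_trans hDle (Nat.div_le_self _ _)
    have hperiod := (pv_shift_iff s D hDN).1 (by rw [beq_iff_eq]; exact hshift)
    have hKD : s.toList.length / D * D = s.toList.length := Nat.div_mul_cancel hDdvd
    have h2D : D * 2 ≤ s.toList.length := (Nat.le_div_iff_mul_le (by norm_num : 0 < 2)).1 hDle
    have hK2 : 2 ≤ s.toList.length / D := by
      refine Nat.le_of_mul_le_mul_right ?_ hDpos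
      calc 2 * D = D * 2 := by ring
        _ ≤ s.toList.length := h2D
        _ = s.toList.length / D * D := hKD.symm
    have hKdvd : s.toList.length / D ∣ s.toList.length := Nat.div_dvd_of_dvd hDdvd
    have hKN : s.toList.length / D ≤ s.toList.length := Nat.div_le_self _ _
    have hfd : PySem.Int.floordiv ((s.toList.length : Int)) ((D : Nat) : Int)
        = ((s.toList.length / D : Nat) : Int) := by
      exact_mod_cast PySem.Int.floordiv_natCast s.toList.length D
    rw [hfd]
    refine ⟨⟨by exact_mod_cast hK2, by exact_mod_cast (by omega : s.toList.length / D < s.toList.length + 1)⟩, ?_, ?_⟩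
    · rw [PySem.Int.mod_eq_zero_iff_dvd]; exact_mod_cast hKdvd
    · rw [pv_allEq_iff s (s.toList.length / D) hK2 hKN hKdvd,
        Nat.div_div_self hDdvd (by omega)]
      exact hperiod

theorem pv_main (s : String) : find_all_equal_partitions s = find_all_equal_partitions_alt s := by
  rw [pv_A_eq, pv_B_eq]
  have hpairA : ((PySem.List.pyRange 2 ((s.toList.length : Int) + 1) 1).filter
      (fun parts => decide (PySem.Int.mod ((s.toList.length : Int)) parts = 0) &&
        all_equal_substrings s parts)).Pairwise (· < ·) :=
    (PySem.List.pairwise_lt_pyRange_one 2 ((s.toList.length : Int) + 1)).filter _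
  have hpairB : (((PySem.List.pyRange ((s.toList.length / 2 : Nat) : Int) 0 (-1)).filter
      (fun d => (PySem.Int.mod ((s.toList.length : Int)) d == 0) &&
        (PySem.Str.slice s (some d) none ==
          PySem.Str.slice s none (some ((s.toList.length : Int) - d))))).map
      (fun d => PySem.Int.floordiv ((s.toList.length : Int)) d)).Pairwise (· < ·) := by
    rw [List.pairwise_map]
    have h1 : (PySem.List.pyRange ((s.toList.length / 2 : Nat) : Int) 0 (-1)).Pairwise
        (fun a b => b < a) := by
      rw [PySem.List.pyRange_neg_one_eq_reverse, List.pairwise_reverse]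
      exact PySem.List.pairwise_lt_pyRange_one _ _
    refine (h1.filter _).imp_of_mem ?_
    intro a b ha hb hba
    obtain ⟨haR, hapB⟩ := List.mem_filter.1 ha
    obtain ⟨hbR, hbpB⟩ := List.mem_filter.1 hb
    rw [PySem.List.mem_pyRange_neg_one] at haR hbR
    simp only [Bool.and_eq_true, beq_iff_eq] at hapB hbpB
    lift a to Nat using (by omega : (0:Int) ≤ a) with A
    lift b to Nat using (by omega : (0:Int) ≤ b) with B
    have hAdvd : A ∣ s.toList.length := by
      have := hapB.1; rw [PySem.Int.mod_eq_zero_iff_dvd] at this; exact_mod_cast this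
    have hBdvd : B ∣ s.toList.length := by
      have := hbpB.1; rw [PySem.Int.mod_eq_zero_iff_dvd] at this; exact_mod_cast this
    have hBA : B < A := by exact_mod_cast hba
    have hAN : A ≤ s.toList.length := by
      have h1 : A ≤ s.toList.length / 2 := by exact_mod_cast haR.2
      have h2 : s.toList.length / 2 ≤ s.toList.length := Nat.div_le_self _ _
      omega
    have hlt : s.toList.length / A < s.toList.length / B :=
      pv_div_lt_div (by exact_mod_cast hbR.1) hBA hAdvd hBdvd hAN
    rw [show ((s.toList.length : Int)) = ((s.toList.length : Nat) : Int) from rfl,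
      PySem.Int.floordiv_natCast, PySem.Int.floordiv_natCast]
    exact_mod_cast hlt
  have hnodA := hpairA.imp (fun h => ne_of_lt h)
  have hnodB := hpairB.imp (fun h => ne_of_lt h)
  have hperm := (List.perm_ext_iff_of_nodup hnodA hnodB).2 (fun k => pv_mem_iff s k)
  exact PySem.List.eq_of_perm_of_pairwise_le_of_injective (fun x => x) Function.injective_id
    hperm (hpairA.imp le_of_lt) (hpairB.imp le_of_lt)

-- ===== VERDICT (by name: the statement is the Claim_ definition above) =====
theorem find_all_equal_partitions_spec : Claim_equal_find_all_equal_partitions := by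
  intro s _
  unfold Spec_find_all_equal_partitions
  exact pv_main s
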